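-- pv_equiv track=rewrite | github.com/wUWu11/ics31 | lab/lab6un.py | initials
-- ===== SOURCE A (Python) =====
-- def transform(s1:str)->str:
--     a=''
--     for item in s1:
--         if not((ord(item)>=65 and ord(item)<=90 ) or (ord(item)>=97 and ord(item)<=122)):
--             a+=' ';
--         else:
--             a+=item;
--     return a;
--
-- def initials(s1:str)->str:
--     s1=transform(s1);
--     words=s1.split();
--     a='';
--     for item in words:
--         if(ord(item[0])>=97):
--             a+=chr(ord(item[0])-32);
--         else:
--             a+=item[0];
--     return a;
-- ===== SOURCE B (Python) =====
-- def initials(s1: str) -> str: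
--     out = []
--     prev_sep = True
--     for c in s1:
--         is_letter = ('A' <= c <= 'Z') or ('a' <= c <= 'z')
--         if is_letter and prev_sep:
--             out.append(c.upper())
--         prev_sep = not is_letter
--     return ''.join(out)
-- ===== Notes on version B (the rewrite author's own statement) =====
-- stated objective: simpler
-- what changed: Replaced A's three-pass pipeline (build a transformed copy of the string, split() it into a word list, loop over the words taking first characters) by a single pass over the characters with a prev-was-separator flag that emits an uppercased letter at each separator-to-letter transition.
import Mathlib
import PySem

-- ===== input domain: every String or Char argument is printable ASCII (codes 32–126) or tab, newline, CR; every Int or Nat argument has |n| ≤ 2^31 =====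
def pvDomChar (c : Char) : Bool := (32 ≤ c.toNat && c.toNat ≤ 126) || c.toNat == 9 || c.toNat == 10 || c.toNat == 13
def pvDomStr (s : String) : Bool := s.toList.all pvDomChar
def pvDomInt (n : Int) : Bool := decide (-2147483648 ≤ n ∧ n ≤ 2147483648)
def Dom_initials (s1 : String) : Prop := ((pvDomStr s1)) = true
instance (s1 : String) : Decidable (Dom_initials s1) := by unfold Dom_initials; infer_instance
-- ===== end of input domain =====

-- B replaces A's transform-string + split() + first-letter pass by one pass over the characters
-- tracking a separator→letter transition flag (objective: simpler; same output, proved equal).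

-- ===== PORT A =====
-- transform: replace every non-ASCII-letter by ' ' (string concatenation ported as list append)
def pvTransform (s1 : String) : String :=
  String.ofList (s1.toList.foldl (fun a item =>
    if !((65 ≤ item.toNat && item.toNat ≤ 90) || (97 ≤ item.toNat && item.toNat ≤ 122))
    then a ++ [' '] else a ++ [item]) [])

def initials (s1 : String) : String :=
  let s1t := pvTransform s1
  let words := PySem.Str.split₀ s1t
  String.ofList (words.foldl (fun a item =>
    match PySem.Str.pyGet? item 0 with
    | none => a  -- unreachable: split() never yields an empty word (Python would raise IndexError)
    | some c => if 97 ≤ c.toNat then a ++ [Char.ofNat (c.toNat - 32)] else a ++ [c]) [])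

-- ===== PORT B =====
def initials_alt (s1 : String) : String :=
  String.ofList (s1.toList.foldl (fun (st : List Char × Bool) c =>
    let isLetter := ('A' ≤ c && c ≤ 'Z') || ('a' ≤ c && c ≤ 'z')
    ((if isLetter && st.2 then st.1 ++ [PySem.Chars.upperChar c] else st.1), !isLetter))
    ([], true)).1

-- ===== PRECONDITION & SPEC =====
def Spec_initials (s1 : String) (out : String) : Prop := out = initials_alt s1
instance (s1 : String) (out : String) : Decidable (Spec_initials s1 out) := by unfold Spec_initials; infer_instance

-- ===== CLAIM (what is proved, stated in full; the proofs are below) =====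
def Claim_equal_initials : Prop := ∀ (s1 : String), Dom_initials s1 → Spec_initials s1 (initials s1)

-- ===== LEMMAS AND PROOFS =====

-- the ASCII-letter test shared by both programs, over Char codes
def pvLetter (c : Char) : Bool := (65 ≤ c.toNat && c.toNat ≤ 90) || (97 ≤ c.toNat && c.toNat ≤ 122)

-- per-word contribution of A's final loop
def pvHead (w : List Char) : List Char :=
  match PySem.List.pyGet? w 0 with
  | none => []
  | some c => if 97 ≤ c.toNat then [Char.ofNat (c.toNat - 32)] else [c]

-- the common recursive specification: prev = "previous char was a separator (or start)"
def pvSpec (cs : List Char) (prev : Bool) : List Char :=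
  match cs with
  | [] => []
  | c :: rest =>
      (if pvLetter c && prev then [PySem.Chars.upperChar c] else []) ++ pvSpec rest (!pvLetter c)

theorem pvTransform_foldl (cs : List Char) (a : List Char) :
    cs.foldl (fun a item =>
      if !((65 ≤ item.toNat && item.toNat ≤ 90) || (97 ≤ item.toNat && item.toNat ≤ 122))
      then a ++ [' '] else a ++ [item]) a
    = a ++ cs.map (fun c => if pvLetter c then c else ' ') := by
  induction cs generalizing a with
  | nil => simp
  | cons c rest ih =>
      simp only [List.foldl_cons, List.map_cons, ih, pvLetter]
      by_cases h : ((65 ≤ c.toNat && c.toNat ≤ 90) || (97 ≤ c.toNat && c.toNat ≤ 122)) = true <;>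
        simp [h]

theorem pvA_foldl (ws : List (List Char)) (a : List Char) :
    ws.foldl (fun a item =>
      match PySem.List.pyGet? item 0 with
      | none => a
      | some c => if 97 ≤ c.toNat then a ++ [Char.ofNat (c.toNat - 32)] else a ++ [c]) a
    = a ++ ws.flatMap pvHead := by
  induction ws generalizing a with
  | nil => simp
  | cons w rest ih =>
      simp only [List.foldl_cons, List.flatMap_cons, ih, pvHead]
      cases h : PySem.List.pyGet? w 0 with
      | none => simp
      | some c => by_cases h97 : 97 ≤ c.toNat <;> simp [h97]

theorem pvB_foldl (cs : List Char) (a : List Char) (prev : Bool) :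
    (cs.foldl (fun (st : List Char × Bool) c =>
      let isLetter := ('A' ≤ c && c ≤ 'Z') || ('a' ≤ c && c ≤ 'z')
      ((if isLetter && st.2 then st.1 ++ [PySem.Chars.upperChar c] else st.1), !isLetter))
      (a, prev)).1
    = a ++ pvSpec cs prev := by
  induction cs generalizing a prev with
  | nil => simp [pvSpec]
  | cons c rest ih =>
      have hlet : (('A' ≤ c && c ≤ 'Z') || ('a' ≤ c && c ≤ 'z')) = pvLetter c := by
        simp only [pvLetter, Char.le_def]
        rfl
      simp only [List.foldl_cons]
      rw [ih]
      simp only [pvSpec, hlet]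
      by_cases h : (pvLetter c && prev) = true <;> simp [h]

theorem pvLetter_not_isspace (c : Char) (h : pvLetter c = true) :
    PySem.Chars.isspace c = false := by
  simp only [pvLetter, Bool.or_eq_true, Bool.and_eq_true, decide_eq_true_eq] at h
  simp only [PySem.Chars.isspace, Bool.or_eq_false_iff, Bool.and_eq_false_iff,
    decide_eq_false_iff_not]
  omega

theorem pvHead_single (c : Char) (h : pvLetter c = true) :
    pvHead [c] = [PySem.Chars.upperChar c] := by
  have hlow : PySem.Chars.islower c = (decide (97 ≤ c.toNat) && decide (c.toNat ≤ 122)) := rfl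
  simp only [pvLetter, Bool.or_eq_true, Bool.and_eq_true, decide_eq_true_eq] at h
  have hget : PySem.List.pyGet? [c] 0 = some c := by
    simp [PySem.List.pyGet?, PySem.List.pyIdx?]
  simp only [pvHead, hget, PySem.Chars.upperChar, hlow]
  by_cases h97 : 97 ≤ c.toNat
  · have h122 : c.toNat ≤ 122 := by omega
    simp [h97, h122]
  · simp [h97]

theorem pvHead_append (w : List Char) (hw : w ≠ []) (x : List Char) :
    pvHead (w ++ x) = pvHead w := by
  cases w with
  | nil => exact absurd rfl hw
  | cons c rest =>
      have h0 : (0:Int) ≤ (rest.length:Int) + (x.length:Int) := by positivity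
      simp [pvHead, PySem.List.pyGet?, PySem.List.pyIdx?, h0]

-- main invariant for split₀.go over the transformed string
theorem pv_main (cs : List Char) (cur : List Char) (acc : List (List Char)) :
    (PySem.Chars.split₀.go (cs.map (fun c => if pvLetter c then c else ' ')) cur acc).flatMap pvHead
    = acc.reverse.flatMap pvHead
      ++ (if cur.isEmpty then [] else pvHead cur.reverse)
      ++ pvSpec cs cur.isEmpty := by
  induction cs generalizing cur acc with
  | nil =>
      simp only [List.map_nil, PySem.Chars.split₀.go, pvSpec]
      by_cases h : cur.isEmpty = true
      · simp [h]
      · simp [h]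
  | cons c rest ih =>
      simp only [List.map_cons]
      by_cases hl : pvLetter c = true
      · have hsp : PySem.Chars.isspace c = false := pvLetter_not_isspace c hl
        have hc' : (if pvLetter c = true then c else ' ') = c := by simp [hl]
        rw [hc', PySem.Chars.split₀.go, if_neg (by simp [hsp])]
        rw [ih (c :: cur) acc]
        simp only [List.isEmpty_cons, List.reverse_cons, pvSpec]
        by_cases hcur : cur.isEmpty = true
        · have : cur = [] := List.isEmpty_iff.mp hcur
          subst this
          simp [hl, pvHead_single c hl]
        · have hne : cur.reverse ≠ [] := by
            intro h; apply hcur; simp [List.isEmpty_iff]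
            simpa using congrArg List.reverse h
          simp [hcur, hl, pvHead_append cur.reverse hne [c]]
      · have hc' : (if pvLetter c = true then c else ' ') = ' ' := by simp [hl]
        have hsp : PySem.Chars.isspace ' ' = true := by decide
        rw [hc', PySem.Chars.split₀.go, if_pos hsp]
        by_cases hcur : cur.isEmpty = true
        · rw [if_pos hcur, ih [] acc]
          simp [pvSpec, hl, hcur]
        · rw [if_neg (by simpa using hcur), ih [] (cur.reverse :: acc)]
          simp [pvSpec, hl, hcur]

theorem initials_spec_aux (s1 : String) : initials s1 = initials_alt s1 := by
  unfold initials initials_alt pvTransform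
  rw [pvTransform_foldl s1.toList []]
  simp only [List.nil_append]
  congr 1
  have hsplit : PySem.Str.split₀
      (String.ofList (s1.toList.map (fun c => if pvLetter c then c else ' ')))
      = (PySem.Chars.split₀.go (s1.toList.map (fun c => if pvLetter c then c else ' ')) [] []).map
          String.ofList := by
    simp [PySem.Str.split₀, PySem.Chars.split₀]
  rw [hsplit]
  rw [pvB_foldl s1.toList [] true]
  simp only [List.nil_append]
  -- move A's fold over Strings to the flatMap over char lists
  have hA : ∀ (ws : List (List Char)) (a : List Char),
      (ws.map String.ofList).foldl (fun a item =>
        match PySem.Str.pyGet? item 0 with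
        | none => a
        | some c => if 97 ≤ c.toNat then a ++ [Char.ofNat (c.toNat - 32)] else a ++ [c]) a
      = ws.foldl (fun a item =>
        match PySem.List.pyGet? item 0 with
        | none => a
        | some c => if 97 ≤ c.toNat then a ++ [Char.ofNat (c.toNat - 32)] else a ++ [c]) a := by
    intro ws
    induction ws with
    | nil => intro a; rfl
    | cons w rest ih =>
        intro a
        simp only [List.map_cons, List.foldl_cons, ih]
        congr 1
        have : PySem.Str.pyGet? (String.ofList w) 0 = PySem.List.pyGet? w 0 := by
          simp [PySem.Str.pyGet?]
        rw [this]
  rw [hA, pvA_foldl]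
  have := pv_main s1.toList [] []
  simpa using this

-- ===== VERDICT (by name: the statement is the Claim_ definition above) =====
theorem initials_spec : Claim_equal_initials := by
  intro s1 _
  unfold Spec_initials
  exact initials_spec_aux s1
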